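-- pv_equiv track=rewrite | github.com/Asteraceaeaa/school | ege/16/62469.py | F
-- ===== SOURCE A (Python) =====
-- memo = {}
--
-- def F(n):
--     if n in memo:
--         return memo[n]
--
--     if n < 15:
--         res = n
--     if n >= 15:
--         res = F(n % 15) * F(n // 15)
--
--     memo[n] = res
--     return res
-- ===== SOURCE B (Python) =====
-- def F(n):
--     prod = 1
--     while n >= 15:
--         prod *= n % 15
--         n //= 15
--     return prod * n
-- ===== Notes on version B (the rewrite author's own statement) =====
-- stated objective: simpler
-- what changed: Replaces the memoised recursion on (n % 15, n // 15) with a single iterative loop that multiplies an accumulator by each base-15 digit; no memo, no recursion, no global state.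
import Mathlib
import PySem

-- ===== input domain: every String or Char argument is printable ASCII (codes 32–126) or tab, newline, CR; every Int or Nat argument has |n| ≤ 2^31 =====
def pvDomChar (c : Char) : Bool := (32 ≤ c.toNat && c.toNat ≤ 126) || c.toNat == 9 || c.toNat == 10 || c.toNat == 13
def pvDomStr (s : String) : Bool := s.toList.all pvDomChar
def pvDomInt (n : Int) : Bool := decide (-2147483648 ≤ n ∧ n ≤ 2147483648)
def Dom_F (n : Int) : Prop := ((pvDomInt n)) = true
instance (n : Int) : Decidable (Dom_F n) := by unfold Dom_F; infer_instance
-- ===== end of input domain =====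

-- B replaces A's memoised recursion by one iterative digit loop (objective: simpler).
-- A's global memo only caches values A computes anyway; it never changes a return value,
-- so the port of A is the same recursion without the cache.

-- ===== PORT A =====
def F (n : Int) : Int :=
  if n < 15 then n
  else F (PySem.Int.mod n 15) * F (PySem.Int.floordiv n 15)
termination_by n.toNat
decreasing_by
  · rw [PySem.Int.mod_eq_emod_of_pos (by omega)]; omega
  · rw [PySem.Int.floordiv_eq_ediv_of_pos (by omega)]; omega

-- ===== PORT B =====
-- the 'while n >= 15' loop of Source B, with 'prod' as accumulator
def FLoop (prod n : Int) : Int :=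
  if n ≥ 15 then FLoop (prod * PySem.Int.mod n 15) (PySem.Int.floordiv n 15)
  else prod * n
termination_by n.toNat
decreasing_by
  rw [PySem.Int.floordiv_eq_ediv_of_pos (by omega)]; omega

def F_alt (n : Int) : Int := FLoop 1 n

-- ===== PRECONDITION & SPEC =====
def Spec_F (n : Int) (out : Int) : Prop := out = F_alt n
instance (n : Int) (out : Int) : Decidable (Spec_F n out) := by unfold Spec_F; infer_instance

-- ===== CLAIM (what is proved, stated in full; the proofs are below) =====
def Claim_equal_F : Prop := ∀ (n : Int), Dom_F n → Spec_F n (F n)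

-- ===== LEMMAS AND PROOFS =====
theorem F_small {n : Int} (h : n < 15) : F n = n := by
  rw [F]; simp [h]

theorem F_big {n : Int} (h : ¬ n < 15) : F n = F (PySem.Int.mod n 15) * F (PySem.Int.floordiv n 15) := by
  rw [F]; simp [h]

theorem FLoop_eq (prod n : Int) : FLoop prod n = prod * F n := by
  induction prod, n using FLoop.induct with
  | case1 prod n h ih =>
    rw [FLoop]
    simp only [h, if_true]
    have hm : PySem.Int.mod n 15 < 15 := by
      rw [PySem.Int.mod_eq_emod_of_pos (by omega)]; omega
    rw [ih, F_big (n := n) (by omega), F_small hm]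
    ring
  | case2 prod n h =>
    rw [FLoop]
    simp only [h, if_false]
    rw [F_small (by omega)]

-- ===== VERDICT (by name: the statement is the Claim_ definition above) =====
theorem F_spec : Claim_equal_F := by
  intro n _
  unfold Spec_F F_alt
  rw [FLoop_eq, one_mul]
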